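-- pv_equiv track=rewrite | github.com/brunobracaioli/juriscan | scripts/agent_io.py | _host_in_whitelist
-- ===== SOURCE A (Python) =====
-- def _host_in_whitelist(host: str, whitelist: set[str]) -> bool:
--     """True if host equals a whitelist entry OR is a subdomain of one."""
--     host = host.strip().lower()
--     if not host:
--         return False
--     # Reject bare IP addresses — hex-safe simple check.
--     if host.replace(".", "").isdigit():
--         return False
--     if host in whitelist:
--         return True
--     for allowed in whitelist:
--         if host.endswith("." + allowed):
--             return True
--     return False
-- ===== SOURCE B (Python) =====
-- def _dot_suffixes(h):
--     """Yield h itself, then every suffix of h that starts right after a dot."""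
--     yield h
--     for i, ch in enumerate(h):
--         if ch == ".":
--             yield h[i + 1:]
--
-- def _host_in_whitelist(host: str, whitelist: set[str]) -> bool:
--     """True if host equals a whitelist entry OR is a subdomain of one."""
--     h = host.strip().lower()
--     if not h or h.replace(".", "").isdigit():
--         return False
--     ws = set(whitelist)
--     return any(s in ws for s in _dot_suffixes(h))
-- ===== Notes on version B (the rewrite author's own statement) =====
-- stated objective: alternative
-- what changed: Instead of scanning every whitelist entry and testing host.endswith('.'+entry), B enumerates the host's dot-suffixes once and looks each up in a set, so the work is independent of the whitelist size.
import Mathlib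
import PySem

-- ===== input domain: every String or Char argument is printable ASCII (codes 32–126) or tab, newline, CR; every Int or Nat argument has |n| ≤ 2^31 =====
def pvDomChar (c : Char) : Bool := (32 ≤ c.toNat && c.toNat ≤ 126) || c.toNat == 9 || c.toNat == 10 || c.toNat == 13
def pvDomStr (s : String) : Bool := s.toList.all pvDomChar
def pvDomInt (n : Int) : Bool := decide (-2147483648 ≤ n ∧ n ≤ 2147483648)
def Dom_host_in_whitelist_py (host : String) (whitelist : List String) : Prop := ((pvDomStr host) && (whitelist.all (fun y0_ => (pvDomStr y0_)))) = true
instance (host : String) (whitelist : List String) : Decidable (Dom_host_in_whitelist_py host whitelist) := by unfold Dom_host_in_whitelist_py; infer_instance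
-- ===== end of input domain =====

-- B replaces A's scan over the whitelist (host.endswith("."+entry) per entry) by one pass over
-- the host enumerating its dot-suffixes and looking each up in a set (alternative algorithm,
-- work independent of the whitelist size).


-- ===== PORT A =====
def host_in_whitelist_py (host : String) (whitelist : List String) : Bool :=
  let h := PySem.Str.lower (PySem.Str.strip host)
  if h == "" then false
  else if PySem.Str.strIsdigit (PySem.Str.replace h "." "") then false
  else if whitelist.contains h then true
  else whitelist.any (fun allowed => PySem.Str.endswith h ("." ++ allowed))

-- ===== PORT B =====
-- B's _dot_suffixes loop fused with the `any` membership test: for each index i with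
-- h[i] = '.', is h[i+1:] in the set?  (structural recursion over the host's suffixes)
def pvSuffixHit (ws : List String) : List Char → Bool
  | [] => false
  | c :: rest => (c == '.' && ws.contains (String.ofList rest)) || pvSuffixHit ws rest

def host_in_whitelist_py_alt (host : String) (whitelist : List String) : Bool :=
  let h := PySem.Str.lower (PySem.Str.strip host)
  if h == "" || PySem.Str.strIsdigit (PySem.Str.replace h "." "") then false
  else whitelist.contains h || pvSuffixHit whitelist h.toList

-- ===== PRECONDITION & SPEC =====
def Spec_host_in_whitelist_py (host : String) (whitelist : List String) (out : Bool) : Prop := out = host_in_whitelist_py_alt host whitelist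
instance (host : String) (whitelist : List String) (out : Bool) : Decidable (Spec_host_in_whitelist_py host whitelist out) := by unfold Spec_host_in_whitelist_py; infer_instance

-- ===== CLAIM (what is proved, stated in full; the proofs are below) =====
def Claim_equal_host_in_whitelist_py : Prop := ∀ (host : String) (whitelist : List String), Dom_host_in_whitelist_py host whitelist → Spec_host_in_whitelist_py host whitelist (host_in_whitelist_py host whitelist)

-- ===== LEMMAS AND PROOFS =====

theorem pvSuffixHit_iff (ws : List String) (cs : List Char) :
    pvSuffixHit ws cs = true ↔ ∃ w ∈ ws, ('.' :: w.toList) <:+ cs := by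
  induction cs with
  | nil =>
      simp only [pvSuffixHit, Bool.false_eq_true, false_iff]
      rintro ⟨w, _, h⟩
      exact absurd (List.eq_nil_of_suffix_nil h) (by simp)
  | cons c rest ih =>
      simp only [pvSuffixHit, Bool.or_eq_true, Bool.and_eq_true, beq_iff_eq, ih]
      constructor
      · rintro (⟨rfl, hmem⟩ | ⟨w, hw, hs⟩)
        · refine ⟨String.ofList rest, by simpa using hmem, ?_⟩
          simp
        · exact ⟨w, hw, hs.trans (List.suffix_cons c rest)⟩
      · rintro ⟨w, hw, hs⟩
        rcases (List.suffix_cons_iff.mp hs) with heq | hs'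
        · have h1 : c = '.' := by
            have := congrArg (fun l => l.head?) heq; simpa using this.symm
          have h2 : w.toList = rest := by
            have := congrArg (fun l => l.tail) heq; simpa using this
          refine Or.inl ⟨h1, ?_⟩
          have hw2 : w = String.ofList rest := by
            have := congrArg String.ofList h2
            simpa using this
          simpa [← hw2] using hw
        · exact Or.inr ⟨w, hw, hs'⟩

theorem any_endswith_eq_pvSuffixHit (ws : List String) (h : String) :
    ws.any (fun allowed => PySem.Str.endswith h ("." ++ allowed)) = pvSuffixHit ws h.toList := by
  rw [Bool.eq_iff_iff, pvSuffixHit_iff, List.any_eq_true]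
  constructor
  · rintro ⟨w, hw, he⟩
    refine ⟨w, hw, ?_⟩
    have := (PySem.Chars.endswith_iff _ _).mp (by simpa using he)
    simpa using this
  · rintro ⟨w, hw, hs⟩
    refine ⟨w, hw, ?_⟩
    simp only [PySem.Str.endswith_eq]
    exact (PySem.Chars.endswith_iff _ _).mpr (by simpa using hs)

-- ===== VERDICT (by name: the statement is the Claim_ definition above) =====
theorem host_in_whitelist_py_spec : Claim_equal_host_in_whitelist_py := by
  intro host whitelist _
  unfold Spec_host_in_whitelist_py host_in_whitelist_py host_in_whitelist_py_alt
  simp only [any_endswith_eq_pvSuffixHit, Bool.or_eq_true]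
  split_ifs <;> simp_all
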